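-- pv_equiv track=rewrite | github.com/DainDwarf/AdventOfCode | 2020/Day09/day09.py | compute_validation_sets
-- ===== SOURCE A (Python) =====
-- def compute_validation_sets(inp, preamble=25):
--     """Precompute the sets of all sum available in a window of size ``preamble``.
--
--     To avoid computing the same sums several times, we insert the computed sum
--     on each impacted set, like this:
--
--       index    forward_index           index+preamble
--         V             V                      V
--     ----------------------------------------------------
--                        ^                     ^
--                         ---------------------
--                        insert sum in those sets
--     """
--
--     valid_sum = [set() for i in range(len(inp))]
--     for index, num in enumerate(inp):
--         for forward_index, forward_num in enumerate(inp[index+1:index+preamble], start=index+1):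
--             if num != forward_num:
--                 for validation_index in range(forward_index+1, min(index+preamble+1, len(valid_sum))):
--                     valid_sum[validation_index].add(num+forward_num)
--     return valid_sum
-- ===== SOURCE B (Python) =====
-- def compute_validation_sets(inp, preamble=25):
--     """Per-index recomputation: each set is built directly from its own window."""
--     result = []
--     for v in range(len(inp)):
--         w = inp[max(0, v - preamble):v]
--         result.append({w[a] + w[b]
--                        for a in range(len(w))
--                        for b in range(a + 1, len(w))
--                        if w[a] != w[b]})
--     return result
-- ===== Notes on version B (the rewrite author's own statement) =====
-- stated objective: simpler
-- what changed: B builds each index's set independently by a direct pair comprehension over that index's own window, replacing A's scatter-style sweep that pushes every computed sum into all sets it affects via a third nested loop.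
import Mathlib
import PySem

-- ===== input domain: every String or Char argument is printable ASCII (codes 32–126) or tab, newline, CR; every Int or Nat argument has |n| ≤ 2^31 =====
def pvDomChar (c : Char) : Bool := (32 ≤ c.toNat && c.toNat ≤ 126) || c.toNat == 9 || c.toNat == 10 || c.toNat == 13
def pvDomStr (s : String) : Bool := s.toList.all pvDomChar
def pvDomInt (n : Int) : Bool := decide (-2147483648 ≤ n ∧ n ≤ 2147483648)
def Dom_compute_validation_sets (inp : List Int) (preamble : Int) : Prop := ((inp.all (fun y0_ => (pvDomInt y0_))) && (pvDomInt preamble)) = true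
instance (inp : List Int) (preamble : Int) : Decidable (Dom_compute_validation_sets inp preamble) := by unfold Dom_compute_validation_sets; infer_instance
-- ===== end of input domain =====

-- B replaces A's scatter-style sweep (inserting each computed sum into every later set it
-- affects, via a third nested loop) by an independent per-index pair comprehension over that
-- index's own preceding window; objective: simpler (same asymptotic cost).

-- ===== PORT A =====
def compute_validation_sets (inp : List Int) (preamble : Int) : List (List Int) :=
  let valid_sum : List (PySem.Set Int) := List.replicate inp.length PySem.Set.empty
  (PySem.List.enumerate inp).foldl (fun vs p =>
    (PySem.List.enumerate (PySem.List.slice inp (some (p.1 + 1)) (some (p.1 + preamble))) (p.1 + 1)).foldl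
      (fun vs q =>
        if p.2 ≠ q.2 then
          (PySem.List.pyRange (q.1 + 1) (min (p.1 + preamble + 1) (vs.length : Int))).foldl
            (fun vs vi =>
              PySem.List.pySetD vs vi (PySem.Set.add (PySem.List.pyGetD vs vi PySem.Set.empty) (p.2 + q.2)))
            vs
        else vs)
      vs)
    valid_sum

-- ===== PORT B =====
def compute_validation_sets_alt (inp : List Int) (preamble : Int) : List (List Int) :=
  (PySem.List.pyRange 0 (inp.length : Int)).map (fun v =>
    let w := PySem.List.slice inp (some (max 0 (v - preamble))) (some v)
    PySem.Set.ofList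
      ((PySem.List.pyRange 0 (w.length : Int)).flatMap (fun a =>
        (PySem.List.pyRange (a + 1) (w.length : Int)).flatMap (fun b =>
          if PySem.List.pyGetD w a 0 ≠ PySem.List.pyGetD w b 0 then
            [PySem.List.pyGetD w a 0 + PySem.List.pyGetD w b 0]
          else []))))

-- ===== PRECONDITION & SPEC =====
def Spec_compute_validation_sets (inp : List Int) (preamble : Int) (out : List (List Int)) : Prop := out = compute_validation_sets_alt inp preamble
instance (inp : List Int) (preamble : Int) (out : List (List Int)) : Decidable (Spec_compute_validation_sets inp preamble out) := by unfold Spec_compute_validation_sets; infer_instance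

-- ===== CLAIM (what is proved, stated in full; the proofs are below) =====
def Claim_equal_compute_validation_sets : Prop := ∀ (inp : List Int) (preamble : Int), Dom_compute_validation_sets inp preamble → Spec_compute_validation_sets inp preamble (compute_validation_sets inp preamble)

-- ===== LEMMAS AND PROOFS =====

-- the common canonical description: for target index u, the sums inp[i]+inp[j] with
-- max(0, u-preamble) <= i < j < u and inp[i] != inp[j], generated in lexicographic (i, j) order
def pvLeaf (inp : List Int) (i j : Int) : List Int :=
  if PySem.List.pyGetD inp i 0 ≠ PySem.List.pyGetD inp j 0 then
    [PySem.List.pyGetD inp i 0 + PySem.List.pyGetD inp j 0]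
  else []

def pvCsums (inp : List Int) (preamble : Int) (u : Int) : List Int :=
  (PySem.List.pyRange (max 0 (u - preamble)) u).flatMap (fun i =>
    (PySem.List.pyRange (i + 1) u).flatMap (fun j => pvLeaf inp i j))

def pvTarget (inp : List Int) (preamble : Int) : List (List Int) :=
  (PySem.List.pyRange 0 (inp.length : Int)).map (fun v =>
    PySem.Set.ofList (pvCsums inp preamble v))

-- one elementary write of A's innermost loop, as an action (target index, summand)
def pvAct (vs : List (PySem.Set Int)) (p : Int × Int) : List (PySem.Set Int) :=
  PySem.List.pySetD vs p.1 (PySem.Set.add (PySem.List.pyGetD vs p.1 PySem.Set.empty) p.2)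

-- A's full, flattened write sequence
def pvActs (inp : List Int) (preamble : Int) : List (Int × Int) :=
  (PySem.List.enumerate inp).flatMap (fun p =>
    (PySem.List.enumerate (PySem.List.slice inp (some (p.1 + 1)) (some (p.1 + preamble))) (p.1 + 1)).flatMap
      (fun q =>
        if p.2 ≠ q.2 then
          (PySem.List.pyRange (q.1 + 1) (min (p.1 + preamble + 1) (inp.length : Int))).map
            (fun vi => (vi, p.2 + q.2))
        else []))

lemma pv_length_pySetD {α : Type} (xs : List α) (i : Int) (v : α) :
    (PySem.List.pySetD xs i v).length = xs.length := by
  unfold PySem.List.pySetD PySem.List.pySet?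
  cases h : PySem.List.pyIdx? xs.length i <;> simp

lemma pv_foldl_length_inv {γ α : Type} (f : List γ → α → List γ)
    (h : ∀ vs a, (f vs a).length = vs.length) (l : List α) (vs : List γ) :
    (l.foldl f vs).length = vs.length := by
  induction l generalizing vs with
  | nil => rfl
  | cons x l ih => simp [List.foldl_cons, ih, h]

lemma pv_foldl_flatMap {α β γ : Type} (g : α → List β) (f : γ → β → γ) (l : List α) (init : γ) :
    (l.flatMap g).foldl f init = l.foldl (fun acc x => (g x).foldl f acc) init := by
  induction l generalizing init with
  | nil => rfl
  | cons x l ih => simp [List.flatMap_cons, List.foldl_append, ih]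

lemma pv_foldl_congr_inv {α β : Type} (P : β → Prop) (f g : β → α → β) (l : List α) (init : β)
    (h0 : P init) (hpres : ∀ b a, P b → P (g b a)) (heq : ∀ b a, P b → f b a = g b a) :
    l.foldl f init = l.foldl g init := by
  induction l generalizing init with
  | nil => rfl
  | cons x l ih =>
    rw [List.foldl_cons, List.foldl_cons, heq _ _ h0]
    exact ih _ (hpres _ _ h0)

lemma pv_filter_pyRange (a b u : Int) :
    (PySem.List.pyRange a b).filter (fun x => decide (x = u)) =
      if a ≤ u ∧ u < b then [u] else [] := by
  split
  · rename_i h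
    rw [PySem.List.pyRange_one_append a u b h.1 (by omega), PySem.List.pyRange_one_cons h.2]
    rw [List.filter_append]
    have h1 : (PySem.List.pyRange a u).filter (fun x => decide (x = u)) = [] := by
      rw [List.filter_eq_nil_iff]; intro x hx
      have := PySem.List.mem_pyRange_one.mp hx
      simp; omega
    have h2 : (PySem.List.pyRange (u+1) b).filter (fun x => decide (x = u)) = [] := by
      rw [List.filter_eq_nil_iff]; intro x hx
      have := PySem.List.mem_pyRange_one.mp hx
      simp; omega
    simp [h1, h2]
  · rename_i h
    rw [List.filter_eq_nil_iff]; intro x hx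
    have := PySem.List.mem_pyRange_one.mp hx
    simp; omega

lemma pv_enumerate_slice (inp : List Int) (a b : Int) (ha : 0 ≤ a) (hb : 0 ≤ b) :
    PySem.List.enumerate (PySem.List.slice inp (some a) (some b)) a =
      (PySem.List.pyRange a (min b (inp.length : Int))).map
        (fun j => (j, PySem.List.pyGetD inp j 0)) := by
  rw [PySem.List.slice_toNat inp ha hb]
  apply List.ext_getElem?
  intro k
  rw [PySem.List.getElem?_enumerate]
  rw [List.getElem?_map, PySem.List.getElem?_pyRange_one]
  rcases Nat.lt_or_ge k ((min b (inp.length:Int) - a).toNat) with hk | hk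
  · have hlen : k < (List.take (b.toNat - a.toNat) (List.drop a.toNat inp)).length := by
      simp [List.length_take, List.length_drop]; omega
    rw [List.getElem?_eq_getElem hlen]
    simp only [hk, if_pos]
    have : (List.take (b.toNat - a.toNat) (List.drop a.toNat inp))[k] = inp[a.toNat + k]'(by
      simp [List.length_take, List.length_drop] at hlen; omega) := by
      rw [List.getElem_take, List.getElem_drop]
    rw [this]
    have : PySem.List.pyGetD inp (a + (k:Int)) 0 = inp[a.toNat + k]'(by
      simp [List.length_take, List.length_drop] at hlen; omega) := by
      rw [PySem.List.pyGetD_of_nonneg _ _ (by omega)]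
      rw [List.getD_eq_getElem]
      · congr 1; omega
      · simp [List.length_take, List.length_drop] at hlen; omega
    simp [this]
  · have hlen : (List.take (b.toNat - a.toNat) (List.drop a.toNat inp)).length ≤ k := by
      simp [List.length_take, List.length_drop]; omega
    rw [List.getElem?_eq_none hlen]
    rw [if_neg (by omega)]
    simp

lemma pv_flatMap_congr_mem {α β : Type} (l : List α) (f g : α → List β)
    (h : ∀ x ∈ l, f x = g x) : l.flatMap f = l.flatMap g := by
  induction l with
  | nil => rfl
  | cons x l ih =>
    rw [List.flatMap_cons, List.flatMap_cons, h x List.mem_cons_self,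
      ih (fun y hy => h y (List.mem_cons_of_mem _ hy))]

lemma pvA_eq_foldl_acts (inp : List Int) (preamble : Int) :
    compute_validation_sets inp preamble =
      (pvActs inp preamble).foldl pvAct (List.replicate inp.length PySem.Set.empty) := by
  unfold compute_validation_sets pvActs
  dsimp only []
  -- step 1: fix the length to inp.length
  rw [pv_foldl_congr_inv (fun vs => vs.length = inp.length) _
    (fun vs p =>
      (PySem.List.enumerate (PySem.List.slice inp (some (p.1 + 1)) (some (p.1 + preamble))) (p.1 + 1)).foldl
        (fun vs q =>
          if p.2 ≠ q.2 then
            (PySem.List.pyRange (q.1 + 1) (min (p.1 + preamble + 1) (inp.length : Int))).foldl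
              (fun vs vi =>
                PySem.List.pySetD vs vi (PySem.Set.add (PySem.List.pyGetD vs vi PySem.Set.empty) (p.2 + q.2)))
              vs
          else vs)
        vs)
    _ _ (by simp)
    (by
      intro vs p hP
      rw [pv_foldl_length_inv]
      · exact hP
      · intro vs' q
        by_cases hc : p.2 ≠ q.2
        · rw [if_pos hc]
          rw [pv_foldl_length_inv]
          intro vs'' vi; exact pv_length_pySetD _ _ _
        · rw [if_neg hc])
    (by
      intro vs p hP
      apply pv_foldl_congr_inv (fun vs' => vs'.length = inp.length) _ _ _ _ hP
      · intro vs' q hP'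
        by_cases hc : p.2 ≠ q.2
        · rw [if_pos hc]
          rw [pv_foldl_length_inv]
          · exact hP'
          · intro vs'' vi; exact pv_length_pySetD _ _ _
        · rw [if_neg hc]; exact hP'
      · intro vs' q hP'
        by_cases hc : p.2 ≠ q.2
        · rw [if_pos hc, if_pos hc, hP']
        · rw [if_neg hc, if_neg hc])]
  -- step 2: flatten the three loops into one action list
  rw [pv_foldl_flatMap]
  congr 1
  funext vs p
  rw [pv_foldl_flatMap]
  apply PySem.List.foldl_congr_mem
  intro acc q hq
  by_cases hc : p.2 ≠ q.2
  · rw [if_pos hc, if_pos hc, List.foldl_map]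
    rfl
  · rw [if_neg hc, if_neg hc, List.foldl_nil]

lemma pvAct_inrange (vs : List (PySem.Set Int)) (p : Int × Int) (h0 : 0 ≤ p.1)
    (h1 : p.1 < (vs.length : Int)) :
    pvAct vs p = vs.set p.1.toNat (PySem.Set.add (vs.getD p.1.toNat PySem.Set.empty) p.2) := by
  unfold pvAct PySem.List.pySetD
  have hcast : p.1 = ((p.1.toNat : Nat) : Int) := by omega
  rw [hcast, PySem.List.pySet?_natCast _ _ _ (by omega), PySem.List.pyGetD_natCast]
  rfl

lemma pvProj (acts : List (Int × Int)) : ∀ (vs : List (PySem.Set Int)) (u : Nat), u < vs.length →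
    (∀ p ∈ acts, 0 ≤ p.1 ∧ p.1 < (vs.length : Int)) →
    (acts.foldl pvAct vs).getD u PySem.Set.empty =
      ((acts.filter (fun p => decide (p.1 = (u : Int)))).map Prod.snd).foldl PySem.Set.add
        (vs.getD u PySem.Set.empty) := by
  induction acts with
  | nil => intro vs u hu hr; rfl
  | cons p acts ih =>
    intro vs u hu hr
    have hp := hr p (List.mem_cons_self)
    rw [List.foldl_cons, pvAct_inrange vs p hp.1 hp.2]
    rw [List.filter_cons]
    by_cases h : p.1 = (u : Int)
    · have hnat : p.1.toNat = u := by omega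
      simp only [h, decide_true, if_pos]
      rw [List.map_cons, List.foldl_cons]
      rw [ih _ u (by simp; omega) (by intro q hq; have := hr q (List.mem_cons_of_mem _ hq); simpa using this)]
      congr 1
      simp only [Int.toNat_natCast]
      rw [List.getD_eq_getElem?_getD, List.getElem?_set_self (by omega), Option.getD_some]
    · simp only [h, decide_false, if_neg, Bool.false_eq_true, not_false_iff]
      rw [ih _ u (by simp; omega) (by intro q hq; have := hr q (List.mem_cons_of_mem _ hq); simpa using this)]
      congr 1
      rw [List.getD_eq_getElem?_getD, List.getElem?_set_ne (by omega), ← List.getD_eq_getElem?_getD]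

lemma pvActs_inrange (inp : List Int) (preamble : Int) :
    ∀ p ∈ pvActs inp preamble, 0 ≤ p.1 ∧ p.1 < (inp.length : Int) := by
  intro p hp
  unfold pvActs at hp
  rw [List.mem_flatMap] at hp
  obtain ⟨a, ha, hp⟩ := hp
  rw [List.mem_flatMap] at hp
  obtain ⟨q, hq, hp⟩ := hp
  obtain ⟨k, hk, ha⟩ := (PySem.List.mem_enumerate_iff _ _ _).mp ha
  obtain ⟨k', hk', hq'⟩ := (PySem.List.mem_enumerate_iff _ _ _).mp hq
  by_cases hc : a.2 ≠ q.2
  · rw [if_pos hc, List.mem_map] at hp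
    obtain ⟨vi, hvi, hp⟩ := hp
    have := PySem.List.mem_pyRange_one.mp hvi
    subst hp
    have h1 : q.1 = a.1 + 1 + (k' : Int) := by rw [hq']
    have h2 : a.1 = 0 + (k : Int) := by rw [ha]
    simp only []
    omega
  · rw [if_neg hc] at hp; simp at hp

lemma pvActs_filtered (inp : List Int) (preamble : Int) (u : Nat) (hu : u < inp.length) :
    ((pvActs inp preamble).filter (fun p => decide (p.1 = (u : Int)))).map Prod.snd =
      pvCsums inp preamble (u : Int) := by
  unfold pvActs
  simp only [List.filter_flatMap, List.map_flatMap]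
  rw [show PySem.List.enumerate inp = PySem.List.enumerate inp 0 from rfl]
  rw [PySem.List.enumerate_eq_map_pyRange inp 0, List.flatMap_map]
  have hn : PySem.List.len inp = (inp.length : Int) := by simp [PySem.List.len]
  rw [hn]
  -- the contribution of one outer index i
  set n : Int := (inp.length : Int) with hdefn
  set lo : Int := max 0 ((u : Int) - preamble) with hdeflo
  have hF : ∀ i : Int, 0 ≤ i → i < n →
      ((PySem.List.enumerate (PySem.List.slice inp (some (i + 1)) (some (i + preamble))) (i + 1)).flatMap
        (fun q => List.map Prod.snd (List.filter (fun p => decide (p.1 = (u : Int)))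
          (if PySem.List.pyGetD inp i 0 ≠ q.2 then
            (PySem.List.pyRange (q.1 + 1) (min (i + preamble + 1) n)).map (fun vi => (vi, PySem.List.pyGetD inp i 0 + q.2))
          else [])))) =
      if lo ≤ i ∧ i < (u : Int) then
        (PySem.List.pyRange (i + 1) (u : Int)).flatMap (fun j => pvLeaf inp i j)
      else [] := by
    intro i h0 hin
    have hstep : ∀ q : Int × Int,
        List.map Prod.snd (List.filter (fun p => decide (p.1 = (u : Int)))
          (if PySem.List.pyGetD inp i 0 ≠ q.2 then
            (PySem.List.pyRange (q.1 + 1) (min (i + preamble + 1) n)).map (fun vi => (vi, PySem.List.pyGetD inp i 0 + q.2))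
          else [])) =
        if PySem.List.pyGetD inp i 0 ≠ q.2 ∧ (q.1 + 1 ≤ (u : Int) ∧ (u : Int) < min (i + preamble + 1) n) then
          [PySem.List.pyGetD inp i 0 + q.2] else [] := by
      intro q
      by_cases hc : PySem.List.pyGetD inp i 0 ≠ q.2
      · rw [if_pos hc, List.filter_map]
        have : ((fun p => decide (p.1 = (u : Int))) ∘ fun vi => (vi, PySem.List.pyGetD inp i 0 + q.2)) =
            fun x => decide (x = (u : Int)) := by funext x; simp
        rw [this, pv_filter_pyRange]
        by_cases hd : q.1 + 1 ≤ (u : Int) ∧ (u : Int) < min (i + preamble + 1) n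
        · rw [if_pos hd, if_pos ⟨hc, hd⟩]; rfl
        · rw [if_neg hd, if_neg (by tauto)]; rfl
      · rw [if_neg hc, if_neg (by tauto)]; rfl
    rw [pv_flatMap_congr_mem _ _ _ (fun q _ => hstep q)]
    by_cases hrange : lo ≤ i ∧ i < (u : Int)
    · rw [if_pos hrange]
      have hup : (u : Int) ≤ i + preamble := by omega
      rw [pv_enumerate_slice inp (i+1) (i+preamble) (by omega) (by omega), ← hn, hn, List.flatMap_map]
      have hsplit : PySem.List.pyRange (i+1) (min (i+preamble) n) =
          PySem.List.pyRange (i+1) (u : Int) ++ PySem.List.pyRange (u : Int) (min (i+preamble) n) :=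
        PySem.List.pyRange_one_append _ _ _ (by omega) (by omega)
      rw [hsplit, List.flatMap_append]
      have hright : (PySem.List.pyRange (u : Int) (min (i+preamble) n)).flatMap
          (fun j => if PySem.List.pyGetD inp i 0 ≠ PySem.List.pyGetD inp j 0 ∧
              (j + 1 ≤ (u : Int) ∧ (u : Int) < min (i + preamble + 1) n) then
            [PySem.List.pyGetD inp i 0 + PySem.List.pyGetD inp j 0] else []) = [] := by
        rw [List.flatMap_eq_nil_iff]
        intro j hj
        have := PySem.List.mem_pyRange_one.mp hj
        rw [if_neg (by omega)]
      rw [hright, List.append_nil]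
      apply pv_flatMap_congr_mem
      intro j hj
      have hjr := PySem.List.mem_pyRange_one.mp hj
      unfold pvLeaf
      by_cases hc : PySem.List.pyGetD inp i 0 ≠ PySem.List.pyGetD inp j 0
      · rw [if_pos ⟨hc, by omega⟩, if_pos hc]
      · rw [if_neg (by tauto), if_neg hc]
    · rw [if_neg hrange]
      rw [List.flatMap_eq_nil_iff]
      intro q hq
      obtain ⟨k, hk, hq'⟩ := (PySem.List.mem_enumerate_iff _ _ _).mp hq
      have hq1 : q.1 = i + 1 + (k : Int) := by rw [hq']
      rw [if_neg (by omega)]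
  refine Eq.trans (pv_flatMap_congr_mem _ _
    (fun i => if lo ≤ i ∧ i < (u : Int) then
      (PySem.List.pyRange (i + 1) (u : Int)).flatMap (fun j => pvLeaf inp i j) else []) ?_) ?_
  · intro i hi
    have hm := PySem.List.mem_pyRange_one.mp hi
    dsimp only
    exact hF i hm.1 hm.2
  unfold pvCsums
  by_cases hcase : lo < (u : Int)
  · have h1 : PySem.List.pyRange 0 n =
        PySem.List.pyRange 0 lo ++ PySem.List.pyRange lo (u : Int) ++ PySem.List.pyRange (u : Int) n :=
      by rw [← PySem.List.pyRange_one_append 0 lo (u:Int) (by omega) (by omega),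
             ← PySem.List.pyRange_one_append 0 (u:Int) n (by omega) (by omega)]
    rw [h1, List.flatMap_append, List.flatMap_append]
    have hL : (PySem.List.pyRange 0 lo).flatMap (fun i => if lo ≤ i ∧ i < (u:Int) then
        (PySem.List.pyRange (i + 1) (u : Int)).flatMap (fun j => pvLeaf inp i j) else []) = [] := by
      rw [List.flatMap_eq_nil_iff]; intro i hi
      have := PySem.List.mem_pyRange_one.mp hi
      rw [if_neg (by omega)]
    have hR : (PySem.List.pyRange (u:Int) n).flatMap (fun i => if lo ≤ i ∧ i < (u:Int) then
        (PySem.List.pyRange (i + 1) (u : Int)).flatMap (fun j => pvLeaf inp i j) else []) = [] := by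
      rw [List.flatMap_eq_nil_iff]; intro i hi
      have := PySem.List.mem_pyRange_one.mp hi
      rw [if_neg (by omega)]
    rw [hL, hR, List.nil_append, List.append_nil]
    apply pv_flatMap_congr_mem
    intro i hi
    have := PySem.List.mem_pyRange_one.mp hi
    rw [if_pos (by omega)]
  · have h2 : PySem.List.pyRange lo (u:Int) = [] := PySem.List.pyRange_one_eq_nil (by omega)
    rw [h2, List.flatMap_nil, List.flatMap_eq_nil_iff]
    intro i hi
    have := PySem.List.mem_pyRange_one.mp hi
    rw [if_neg (by omega)]

lemma pv_pyRange_shift (a b c : Int) :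
    PySem.List.pyRange (a + c) (b + c) = (PySem.List.pyRange a b).map (· + c) := by
  rw [PySem.List.pyRange_one, PySem.List.pyRange_one, List.map_map]
  have h : (b + c - (a + c)) = b - a := by ring
  rw [h]
  apply List.map_congr_left
  intro k _
  simp
  ring

lemma pvA_eq_target (inp : List Int) (preamble : Int) :
    compute_validation_sets inp preamble = pvTarget inp preamble := by
  rw [pvA_eq_foldl_acts]
  have hlen : ((pvActs inp preamble).foldl pvAct (List.replicate inp.length PySem.Set.empty)).length
      = inp.length := by
    rw [pv_foldl_length_inv pvAct (fun vs p => pv_length_pySetD _ _ _)]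
    simp
  apply List.ext_getElem
  · rw [hlen]
    unfold pvTarget
    simp [PySem.List.length_pyRange_one]
  intro u h1 h2
  have hu : u < inp.length := by rw [hlen] at h1; exact h1
  have hproj := pvProj (pvActs inp preamble) (List.replicate inp.length PySem.Set.empty) u
    (by simpa using hu)
    (by simpa using pvActs_inrange inp preamble)
  rw [← List.getD_eq_getElem _ PySem.Set.empty h1, hproj, pvActs_filtered inp preamble u hu]
  have hrep : (List.replicate inp.length (PySem.Set.empty : PySem.Set Int)).getD u PySem.Set.empty
      = PySem.Set.empty := by
    rw [List.getD_eq_getElem _ _ (by simpa using hu), List.getElem_replicate]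
  rw [hrep]
  unfold pvTarget
  rw [List.getElem_map, PySem.List.getElem_pyRange_one _ _ _ (by simp [PySem.List.length_pyRange_one]; omega)]
  rw [PySem.Set.ofList_eq_foldl]
  norm_num

lemma pvB_eq_target (inp : List Int) (preamble : Int) :
    compute_validation_sets_alt inp preamble = pvTarget inp preamble := by
  unfold compute_validation_sets_alt pvTarget
  apply List.map_congr_left
  intro v hv
  obtain ⟨hv0, hvn⟩ := PySem.List.mem_pyRange_one.mp hv
  dsimp only
  congr 1
  have hlo0 : 0 ≤ max 0 (v - preamble) := le_max_left _ _
  rw [PySem.List.slice_toNat inp hlo0 hv0]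
  set lo : Int := max 0 (v - preamble) with hdeflo
  set w : List Int := List.take (v.toNat - lo.toNat) (List.drop lo.toNat inp) with hdefw
  unfold pvCsums
  rw [← hdeflo]
  by_cases hcase : v ≤ lo
  · have hw : w = [] := by
      rw [hdefw, show v.toNat - lo.toNat = 0 by omega, List.take_zero]
    rw [hw, PySem.List.pyRange_one_eq_nil hcase,
      show PySem.List.pyRange 0 ((([] : List Int).length : Int)) = [] from
        PySem.List.pyRange_one_eq_nil (by simp)]
    simp
  · have hwl : w.length = v.toNat - lo.toNat := by
      rw [hdefw]
      simp only [List.length_take, List.length_drop]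
      omega
    have hwlInt : (w.length : Int) = v - lo := by omega
    have hwget : ∀ a : Int, 0 ≤ a → a < (w.length : Int) →
        PySem.List.pyGetD w a 0 = PySem.List.pyGetD inp (a + lo) 0 := by
      intro a ha0 ha1
      rw [PySem.List.pyGetD_of_nonneg _ _ ha0, PySem.List.pyGetD_of_nonneg _ _ (by omega)]
      have hb1 : a.toNat < w.length := by omega
      have hb2 : (a + lo).toNat < inp.length := by omega
      have hg : w[a.toNat]'hb1 = inp[(a + lo).toNat]'hb2 := by
        have h3 : w[a.toNat]'hb1 =
            (List.drop lo.toNat inp)[a.toNat]'(by simp only [List.length_drop]; omega) :=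
          List.getElem_take
        rw [h3, List.getElem_drop]
        congr 1
        omega
      rw [List.getD_eq_getElem _ _ hb1, List.getD_eq_getElem _ _ hb2, hg]
    have h1 : PySem.List.pyRange lo v = (PySem.List.pyRange 0 (w.length : Int)).map (· + lo) := by
      rw [← pv_pyRange_shift]
      congr 1 <;> omega
    rw [h1, List.flatMap_map]
    apply pv_flatMap_congr_mem
    intro a ha
    obtain ⟨ha0, ha1⟩ := PySem.List.mem_pyRange_one.mp ha
    have h2 : PySem.List.pyRange (a + lo + 1) v = (PySem.List.pyRange (a + 1) (w.length : Int)).map (· + lo) := by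
      rw [← pv_pyRange_shift]
      congr 1 <;> omega
    rw [h2, List.flatMap_map]
    apply pv_flatMap_congr_mem
    intro b hb
    obtain ⟨hb0, hb1⟩ := PySem.List.mem_pyRange_one.mp hb
    unfold pvLeaf
    rw [hwget a ha0 ha1, hwget b (by omega) hb1]

-- ===== VERDICT (by name: the statement is the Claim_ definition above) =====
theorem compute_validation_sets_spec : Claim_equal_compute_validation_sets := by
  intro inp preamble _
  unfold Spec_compute_validation_sets
  rw [pvA_eq_target, pvB_eq_target]
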